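-- pv_equiv track=rewrite | github.com/szsdk/emcfile | emcfile/_misc.py | divide_range
-- ===== SOURCE A (Python) =====
-- from typing import List, Tuple
--
-- def divide_range(s: int, e: int, n: int) -> List[Tuple[int, int]]:
--     """
--     This function divides a range `range(s, e)` into `n` pieces nearly equivalently.
--
--     Parameters
--     ----------
--     s : int
--         The start.
--     e : int
--         The end.
--     n : int
--         The number of pieces.
--
--     Returns
--     -------
--     List[Tuple[int, int]]:
--         The result
--
--     Raises
--     ------
--     ValueError:
--         `n` should be a integer larger than 0.
--
--     See Also
--     --------
--     tests.test_utils.test_divide_range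
--     """
--     if n <= 0:
--         raise ValueError(f"n(={n}) should be positive")
--     base = (e - s) // n
--     size = (e - s) % n
--     ans = []
--     for _ in range(size):
--         ans.append((s, s + base + 1))
--         s += base + 1
--     if base == 0:
--         return ans
--     for _ in range(size, n):
--         ans.append((s, s + base))
--         s += base
--     return ans
-- ===== SOURCE B (Python) =====
-- def divide_range(s, e, n):
--     if n <= 0:
--         raise ValueError(f"n(={n}) should be positive")
--     total = e - s
--     base = total // n
--     size = total % n
--     count = size if base == 0 else n
--     return [(s + i * base + min(i, size), s + (i + 1) * base + min(i + 1, size))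
--             for i in range(count)]
-- ===== Notes on version B (the rewrite author's own statement) =====
-- stated objective: alternative
-- what changed: Replaces the two sequential accumulating loops that mutate a running start with a single closed-form comprehension computing each piece's endpoints directly from its index (start_i = s + i*base + min(i,size)).
import Mathlib
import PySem

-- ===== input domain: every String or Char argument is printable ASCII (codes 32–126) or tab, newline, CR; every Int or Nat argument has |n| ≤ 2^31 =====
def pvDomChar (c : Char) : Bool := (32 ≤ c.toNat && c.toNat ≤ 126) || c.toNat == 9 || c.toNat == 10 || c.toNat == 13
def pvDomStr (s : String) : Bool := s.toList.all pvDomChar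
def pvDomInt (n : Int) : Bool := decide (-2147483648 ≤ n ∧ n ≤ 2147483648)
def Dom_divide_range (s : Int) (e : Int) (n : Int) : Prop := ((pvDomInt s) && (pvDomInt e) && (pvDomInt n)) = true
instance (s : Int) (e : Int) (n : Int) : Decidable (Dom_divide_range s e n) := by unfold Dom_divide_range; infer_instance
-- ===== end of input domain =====

-- B replaces A's two sequential accumulating loops (mutating a running start) by a single
-- closed-form list comprehension computing each piece directly from its index (objective: alternative).

-- ===== PORT A =====
-- first loop: for _ in range(size): ans.append((s, s+base+1)); s += base+1
def drLoopA1 : Nat → Int → Int → List (Int × Int) → Int × List (Int × Int)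
  | 0, s, _, ans => (s, ans)
  | k+1, s, base, ans => drLoopA1 k (s + base + 1) base (ans ++ [(s, s + base + 1)])

-- second loop: for _ in range(size, n): ans.append((s, s+base)); s += base
def drLoopA2 : Nat → Int → Int → List (Int × Int) → Int × List (Int × Int)
  | 0, s, _, ans => (s, ans)
  | k+1, s, base, ans => drLoopA2 k (s + base) base (ans ++ [(s, s + base)])

def divide_range (s : Int) (e : Int) (n : Int) : List (Int × Int) :=
  if n ≤ 0 then []  -- Python raises ValueError here; excluded by Pre_
  else
    let base := PySem.Int.floordiv (e - s) n
    let size := PySem.Int.mod (e - s) n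
    let r1 := drLoopA1 size.toNat s base []
    if base = 0 then r1.2
    else (drLoopA2 (n - size).toNat r1.1 base r1.2).2

-- ===== PORT B =====
def divide_range_alt (s : Int) (e : Int) (n : Int) : List (Int × Int) :=
  if n ≤ 0 then []  -- Python raises ValueError here; excluded by Pre_
  else
    let total := e - s
    let base := PySem.Int.floordiv total n
    let size := PySem.Int.mod total n
    let count := if base = 0 then size else n
    (PySem.List.pyRange 0 count 1).map
      (fun i => (s + i * base + min i size, s + (i + 1) * base + min (i + 1) size))

-- ===== PRECONDITION & SPEC =====
-- Pre_ excludes exactly n ≤ 0, where the Python A raises ValueError (and B raises too).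
def Pre_divide_range (s : Int) (e : Int) (n : Int) : Prop := 0 < n
instance (s : Int) (e : Int) (n : Int) : Decidable (Pre_divide_range s e n) := by unfold Pre_divide_range; infer_instance
def pvWitness_divide_range : Int × Int × Int := (2, 13, 4)

def Spec_divide_range (s : Int) (e : Int) (n : Int) (out : List (Int × Int)) : Prop := out = divide_range_alt s e n
instance (s : Int) (e : Int) (n : Int) (out : List (Int × Int)) : Decidable (Spec_divide_range s e n out) := by unfold Spec_divide_range; infer_instance

-- ===== CLAIM (what is proved, stated in full; the proofs are below) =====
def Claim_equal_divide_range : Prop := ∀ (s : Int) (e : Int) (n : Int), Dom_divide_range s e n → Pre_divide_range s e n → Spec_divide_range s e n (divide_range s e n)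

-- ===== LEMMAS AND PROOFS =====

theorem drLoopA1_eq (k : Nat) : ∀ (s base : Int) (ans : List (Int × Int)),
    drLoopA1 k s base ans =
      (s + k * (base + 1),
       ans ++ (List.range k).map (fun i : Nat => (s + (i : Int) * (base + 1), s + (i : Int) * (base + 1) + base + 1))) := by
  induction k with
  | zero => intro s base ans; simp [drLoopA1]
  | succ k ih =>
    intro s base ans
    rw [drLoopA1, ih, List.range_succ_eq_map]
    simp only [Prod.mk.injEq, List.map_cons, List.map_map, List.append_assoc,
      List.singleton_append, Nat.cast_zero, Nat.cast_succ]
    refine ⟨by ring, ?_⟩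
    congr 2
    · simp only [Prod.mk.injEq]; constructor <;> ring
    · apply List.map_congr_left
      intro i _
      simp only [Function.comp_apply, Nat.cast_succ, Prod.mk.injEq]
      constructor <;> ring

theorem drLoopA2_eq (k : Nat) : ∀ (s base : Int) (ans : List (Int × Int)),
    drLoopA2 k s base ans =
      (s + k * base,
       ans ++ (List.range k).map (fun i : Nat => (s + (i : Int) * base, s + (i : Int) * base + base))) := by
  induction k with
  | zero => intro s base ans; simp [drLoopA2]
  | succ k ih =>
    intro s base ans
    rw [drLoopA2, ih, List.range_succ_eq_map]
    simp only [Prod.mk.injEq, List.map_cons, List.map_map, List.append_assoc,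
      List.singleton_append, Nat.cast_zero, Nat.cast_succ]
    refine ⟨by ring, ?_⟩
    congr 2
    · simp only [Prod.mk.injEq]; constructor <;> ring
    · apply List.map_congr_left
      intro i _
      simp only [Function.comp_apply, Nat.cast_succ, Prod.mk.injEq]
      constructor <;> ring

-- ===== VERDICT (by name: the statement is the Claim_ definition above) =====
theorem divide_range_spec : Claim_equal_divide_range := by
  intro s e n _ hn
  unfold Spec_divide_range divide_range divide_range_alt
  have hn' : ¬ n ≤ 0 := by exact fun h => absurd hn (by simp [Pre_divide_range]; omega)
  have hnpos : (0 : Int) < n := hn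
  simp only [hn', if_false]
  set base := PySem.Int.floordiv (e - s) n with hb
  set size := PySem.Int.mod (e - s) n with hsz
  have hsz0 : 0 ≤ size := PySem.Int.mod_nonneg _ hnpos
  have hszlt : size < n := PySem.Int.mod_lt _ hnpos
  rw [drLoopA1_eq]
  by_cases hb0 : base = 0
  · simp only [hb0, if_true, List.nil_append, PySem.List.pyRange_one, Int.sub_zero,
      List.map_map]
    apply List.map_congr_left
    intro k hk
    rw [List.mem_range] at hk
    have h1 : (k : Int) < size := by omega
    simp only [Function.comp_apply, Prod.mk.injEq]
    have hm1 : min ((0 : Int) + (k : Int)) size = (0 : Int) + k := by omega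
    have hm2 : min ((0 : Int) + (k : Int) + 1) size = (0 : Int) + k + 1 := by omega
    rw [hm1, hm2]
    constructor <;> ring
  · simp only [hb0, if_false]
    rw [drLoopA2_eq]
    simp only [List.nil_append, PySem.List.pyRange_one, Int.sub_zero, List.map_map]
    have hsplit : (n : Int).toNat = size.toNat + (n - size).toNat := by omega
    rw [hsplit, List.range_add, List.map_append, List.map_map]
    congr 1
    · apply List.map_congr_left
      intro k hk
      rw [List.mem_range] at hk
      have h1 : (k : Int) < size := by omega
      simp only [Function.comp_apply, Prod.mk.injEq]
      have hm1 : min ((0 : Int) + (k : Int)) size = (0 : Int) + k := by omega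
      have hm2 : min ((0 : Int) + (k : Int) + 1) size = (0 : Int) + k + 1 := by omega
      rw [hm1, hm2]
      constructor <;> ring
    · apply List.map_congr_left
      intro j hj
      rw [List.mem_range] at hj
      have hcast : ((size.toNat : Int)) = size := Int.toNat_of_nonneg hsz0
      simp only [Function.comp_apply, Prod.mk.injEq]
      have hc2 : ((size.toNat + j : Nat) : Int) = size + j := by push_cast; omega
      rw [hc2]
      have hm1 : min ((0 : Int) + (size + (j : Int))) size = size := by omega
      have hm2 : min ((0 : Int) + (size + (j : Int)) + 1) size = size := by omega
      rw [hm1, hm2]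
      constructor
      · rw [hcast]; ring
      · rw [hcast]; ring
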